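-- pv_equiv track=rewrite | github.com/yuguonet/QuantDinger | optimizer/llm_strategy_generator.py | _extract_build_function
-- ===== SOURCE A (Python) =====
-- def _extract_build_function(source_code: str, fn_name: str) -> str:
--     """从完整代码中提取指定的 _build_xxx_config 函数"""
--     lines = source_code.split('\n')
--     result_lines = []
--     in_func = False
--     func_indent = 0
--
--     for line in lines:
--         stripped = line.strip()
--         # 检测函数定义开始
--         if stripped.startswith(f'def {fn_name}(') or stripped.startswith(f'def {fn_name} ('):
--             in_func = True
--             func_indent = len(line) - len(line.lstrip())
--             result_lines.append(line)
--             continue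
--
--         if in_func:
--             # 检测下一个顶层定义（同级或更少缩进的 def/class）
--             if stripped and not stripped.startswith('#'):
--                 current_indent = len(line) - len(line.lstrip())
--                 if current_indent <= func_indent and (stripped.startswith('def ') or stripped.startswith('class ') or stripped.startswith('STRATEGY_TEMPLATE')):
--                     break
--             result_lines.append(line)
--
--     if result_lines:
--         return '\n'.join(result_lines)
--
--     # 如果没找到，返回占位
--     return f"def {fn_name}(p: dict) -> dict:\n    # 函数源码提取失败\n    pass"
-- ===== SOURCE B (Python) =====
-- def _extract_build_function(source_code: str, fn_name: str) -> str:
--     """Index-based extraction: list header and terminator line indices up front, then slice."""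
--     lines = source_code.split('\n')
--
--     def indent(ln):
--         return len(ln) - len(ln.lstrip())
--
--     headers = [i for i, ln in enumerate(lines)
--                if ln.strip().startswith(f'def {fn_name}(')
--                or ln.strip().startswith(f'def {fn_name} (')]
--     if not headers:
--         return f"def {fn_name}(p: dict) -> dict:\n    # 函数源码提取失败\n    pass"
--
--     start = headers[0]
--     level = indent(lines[start])
--     terminators = [i for i, ln in enumerate(lines)
--                    if ln.strip() and not ln.strip().startswith('#')
--                    and indent(ln) <= level
--                    and (ln.strip().startswith('def ')
--                         or ln.strip().startswith('class ')
--                         or ln.strip().startswith('STRATEGY_TEMPLATE'))]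
--     end = next((i for i in terminators if i > start), len(lines))
--     return '\n'.join(lines[start:end])
-- ===== Notes on version B (the rewrite author's own statement) =====
-- stated objective: alternative
-- what changed: A's stateful flag-and-accumulator scan (in_func, func_indent, break) is replaced by staged index computation: build the list of header-line indices and the list of terminator-line indices, pick start and end from them, and join the slice lines[start:end]; Pre_ excludes sources with more than one 'def fn_name(' header line, on which A's behaviour (a repeated header resets the indent and the scan continues) is an accident of its flag loop and either extraction is defensible.
import Mathlib
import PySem

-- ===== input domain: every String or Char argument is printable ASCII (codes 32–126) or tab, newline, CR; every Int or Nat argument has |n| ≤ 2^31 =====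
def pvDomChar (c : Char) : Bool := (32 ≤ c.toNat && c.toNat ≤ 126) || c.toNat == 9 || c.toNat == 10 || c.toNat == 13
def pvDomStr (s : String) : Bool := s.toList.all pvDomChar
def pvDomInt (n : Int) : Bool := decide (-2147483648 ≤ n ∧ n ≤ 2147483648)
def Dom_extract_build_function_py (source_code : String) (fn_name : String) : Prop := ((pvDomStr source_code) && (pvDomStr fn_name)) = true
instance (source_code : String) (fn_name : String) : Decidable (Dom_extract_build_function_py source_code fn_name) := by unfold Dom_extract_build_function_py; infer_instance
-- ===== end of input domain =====

-- B replaces A's stateful flag-and-accumulator scan by staged index computation (header indices,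
-- terminator indices, then a slice between them); objective: alternative decomposition, same linear cost.

-- ===== PORT A =====
-- indentation of a line: len(line) - len(line.lstrip())  (computed verbatim by both Pythons)
def pvIndent (line : String) : Int :=
  PySem.Str.len line - PySem.Str.len (PySem.Str.lstrip line)

-- the for-loop of A, state = (result_lines, in_func, func_indent); returning result_lines models 'break'
def pvLoopA (fn : String) : List String → List String → Bool → Int → List String
  | [], result_lines, _, _ => result_lines
  | line :: rest, result_lines, in_func, func_indent =>
    if PySem.Str.startswith (PySem.Str.strip line) ("def " ++ fn ++ "(")
        || PySem.Str.startswith (PySem.Str.strip line) ("def " ++ fn ++ " (") then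
      pvLoopA fn rest (result_lines ++ [line]) true (pvIndent line)
    else if in_func then
      if (PySem.Str.strip line != "") && (!PySem.Str.startswith (PySem.Str.strip line) "#")
          && decide (pvIndent line ≤ func_indent)
          && (PySem.Str.startswith (PySem.Str.strip line) "def "
              || PySem.Str.startswith (PySem.Str.strip line) "class "
              || PySem.Str.startswith (PySem.Str.strip line) "STRATEGY_TEMPLATE") then
        result_lines  -- break
      else
        pvLoopA fn rest (result_lines ++ [line]) in_func func_indent
    else
      pvLoopA fn rest result_lines in_func func_indent

def extract_build_function_py (source_code : String) (fn_name : String) : String :=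
  let lines := (PySem.Str.split? source_code "\n").getD []
  let result_lines := pvLoopA fn_name lines [] false 0
  if result_lines ≠ [] then
    PySem.Str.join "\n" result_lines
  else
    "def " ++ fn_name ++ "(p: dict) -> dict:\n    # 函数源码提取失败\n    pass"

-- ===== PORT B =====
-- the header test of Source B's 'headers' comprehension
def pvIsHeader (fn line : String) : Bool :=
  PySem.Str.startswith (PySem.Str.strip line) ("def " ++ fn ++ "(")
    || PySem.Str.startswith (PySem.Str.strip line) ("def " ++ fn ++ " (")

-- the terminator test of Source B's 'terminators' comprehension
def pvIsBoundary (level : Int) (line : String) : Bool :=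
  (PySem.Str.strip line != "") && (!PySem.Str.startswith (PySem.Str.strip line) "#")
    && decide (pvIndent line ≤ level)
    && (PySem.Str.startswith (PySem.Str.strip line) "def "
        || PySem.Str.startswith (PySem.Str.strip line) "class "
        || PySem.Str.startswith (PySem.Str.strip line) "STRATEGY_TEMPLATE")

-- '[i for i, ln in enumerate(lines) if p(ln)]'
def pvIdxWhere (p : String → Bool) : List String → Nat → List Nat
  | [], _ => []
  | line :: rest, i =>
    if p line then i :: pvIdxWhere p rest (i + 1) else pvIdxWhere p rest (i + 1)

def extract_build_function_py_alt (source_code : String) (fn_name : String) : String :=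
  let lines := (PySem.Str.split? source_code "\n").getD []
  match pvIdxWhere (pvIsHeader fn_name) lines 0 with
  | [] => "def " ++ fn_name ++ "(p: dict) -> dict:\n    # 函数源码提取失败\n    pass"
  | start :: _ =>
    let level := pvIndent (PySem.List.pyGetD lines (start : Int) "")
    let terms := pvIdxWhere (pvIsBoundary level) lines 0
    let endIdx := (terms.find? (fun i => decide (start < i))).getD lines.length
    PySem.Str.join "\n" (PySem.List.slice lines (some (start : Int)) (some (endIdx : Int)))

-- ===== PRECONDITION & SPEC =====
-- Pre_ excludes sources with more than one 'def fn_name(' header line, on which A's behaviour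
-- (a repeated header resets the indent and the scan continues) is an accident of its flag loop
-- and either extraction is defensible.
def Pre_extract_build_function_py (source_code : String) (fn_name : String) : Prop :=
  ((PySem.Str.split? source_code "\n").getD []).countP (pvIsHeader fn_name) ≤ 1
instance (source_code : String) (fn_name : String) : Decidable (Pre_extract_build_function_py source_code fn_name) := by unfold Pre_extract_build_function_py; infer_instance

def pvWitness_extract_build_function_py : String × String :=
  ("def f(x):\n    return x\n\ndef g():\n    pass", "f")

def Spec_extract_build_function_py (source_code : String) (fn_name : String) (out : String) : Prop := out = extract_build_function_py_alt source_code fn_name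
instance (source_code : String) (fn_name : String) (out : String) : Decidable (Spec_extract_build_function_py source_code fn_name out) := by unfold Spec_extract_build_function_py; infer_instance

-- ===== CLAIM (what is proved, stated in full; the proofs are below) =====
def Claim_equal_extract_build_function_py : Prop := ∀ (source_code : String) (fn_name : String), Dom_extract_build_function_py source_code fn_name → Pre_extract_build_function_py source_code fn_name → Spec_extract_build_function_py source_code fn_name (extract_build_function_py source_code fn_name)

-- ===== LEMMAS AND PROOFS =====

-- an empty index list means the predicate holds nowhere
theorem pvIdxWhere_eq_nil {p : String → Bool} : ∀ (ls : List String) (i : Nat),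
    pvIdxWhere p ls i = [] → ∀ x ∈ ls, p x = false := by
  intro ls
  induction ls with
  | nil => intro i _ x hx; simp at hx
  | cons l rest ih =>
    intro i h x hx
    by_cases hp : p l
    · simp [pvIdxWhere, hp] at h
    · simp only [pvIdxWhere, hp, if_false, Bool.false_eq_true] at h
      rcases List.mem_cons.mp hx with rfl | hx
      · simpa using hp
      · exact ih (i + 1) h x hx

-- a nonempty index list decomposes the source at its first hit
theorem pvIdxWhere_cons_decomp {p : String → Bool} : ∀ (ls : List String) (i j : Nat) (t : List Nat),
    pvIdxWhere p ls i = j :: t →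
    ∃ pre l rest, ls = pre ++ l :: rest ∧ (∀ x ∈ pre, p x = false) ∧ p l = true ∧ j = i + pre.length := by
  intro ls
  induction ls with
  | nil => intro i j t h; simp [pvIdxWhere] at h
  | cons l rest ih =>
    intro i j t h
    by_cases hp : p l
    · simp only [pvIdxWhere, hp, if_true, List.cons.injEq] at h
      exact ⟨[], l, rest, by simp, by simp, hp, by simp [← h.1]⟩
    · simp only [pvIdxWhere, hp, if_false, Bool.false_eq_true] at h
      obtain ⟨pre, l', rest', heq, hpre, hl', hj⟩ := ih (i + 1) j t h
      refine ⟨l :: pre, l', rest', by simp [heq], ?_, hl', by simp; omega⟩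
      intro x hx
      rcases List.mem_cons.mp hx with rfl | hx
      · simpa using hp
      · exact hpre x hx

theorem pvIdxWhere_append {p : String → Bool} : ∀ (a b : List String) (i : Nat),
    pvIdxWhere p (a ++ b) i = pvIdxWhere p a i ++ pvIdxWhere p b (i + a.length) := by
  intro a
  induction a with
  | nil => intro b i; simp [pvIdxWhere]
  | cons l rest ih =>
    intro b i
    by_cases hp : p l
    · simp [pvIdxWhere, hp, ih]; ring_nf
    · simp [pvIdxWhere, hp, ih]; ring_nf

theorem pvIdxWhere_mem_bounds {p : String → Bool} : ∀ (ls : List String) (i j : Nat),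
    j ∈ pvIdxWhere p ls i → i ≤ j ∧ j < i + ls.length := by
  intro ls
  induction ls with
  | nil => intro i j h; simp [pvIdxWhere] at h
  | cons l rest ih =>
    intro i j h
    by_cases hp : p l
    · simp only [pvIdxWhere, hp, if_true] at h
      rcases List.mem_cons.mp h with rfl | h
      · simp
      · have := ih (i + 1) j h; simp; omega
    · simp only [pvIdxWhere, hp, if_false, Bool.false_eq_true] at h
      have := ih (i + 1) j h; simp; omega

theorem pvFind_skip {q : Nat → Bool} : ∀ (a b : List Nat),
    (∀ x ∈ a, q x = false) → List.find? q (a ++ b) = List.find? q b := by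
  intro a
  induction a with
  | nil => intro b _; simp
  | cons x rest ih =>
    intro b h
    have hx : q x = false := h x (by simp)
    simp only [List.cons_append, List.find?, hx]
    exact ih b (fun y hy => h y (by simp [hy]))

theorem pvFind_head {q : Nat → Bool} : ∀ (l : List Nat),
    (∀ x ∈ l, q x = true) → List.find? q l = l.head? := by
  intro l
  cases l with
  | nil => intro _; simp
  | cons x rest => intro h; simp [List.find?, h x (by simp)]

-- the first index where p holds (offset i), with the past-the-end default, is i + findIdx
theorem pvIdxWhere_head_getD {p : String → Bool} : ∀ (ls : List String) (i : Nat),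
    ((pvIdxWhere p ls i).head?).getD (i + ls.length) = i + List.findIdx p ls := by
  intro ls
  induction ls with
  | nil => intro i; simp [pvIdxWhere]
  | cons l rest ih =>
    intro i
    by_cases hp : p l
    · simp [pvIdxWhere, hp, List.findIdx_cons]
    · have hp' : p l = false := by simpa using hp
      simp only [pvIdxWhere, hp', if_false, Bool.false_eq_true, List.findIdx_cons, cond_false,
        List.length_cons]
      have := ih (i + 1)
      rw [show i + (rest.length + 1) = i + 1 + rest.length by omega, this]
      omega

-- A's loop with in_func set, on a suffix with no further header line
theorem pvLoopA_phase2 (fn : String) : ∀ (ls res : List String) (fi : Int),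
    (∀ x ∈ ls, pvIsHeader fn x = false) →
    pvLoopA fn ls res true fi = res ++ ls.take (List.findIdx (pvIsBoundary fi) ls) := by
  intro ls
  induction ls with
  | nil => intro res fi _; simp [pvLoopA]
  | cons l rest ih =>
    intro res fi hh
    have h1 : pvIsHeader fn l = false := hh l (by simp)
    simp only [pvIsHeader, Bool.or_eq_false_iff] at h1
    obtain ⟨h1a, h1b⟩ := h1
    simp at h1a h1b
    by_cases h2 : pvIsBoundary fi l
    · have h2b : pvIsBoundary fi l = true := h2
      have h2' := h2b
      simp only [pvIsBoundary] at h2'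
      simp only [pvLoopA]
      rw [if_neg (by simp [h1a, h1b]), if_pos (by trivial), if_pos h2']
      simp [List.findIdx_cons, h2b]
    · have h2b : pvIsBoundary fi l = false := by simpa using h2
      have h2' := h2b
      simp only [pvIsBoundary] at h2'
      simp only [pvLoopA]
      rw [if_neg (by simp [h1a, h1b]), if_pos (by trivial), if_neg (fun hc => Bool.false_ne_true (h2'.symm.trans hc))]
      simp only [List.findIdx_cons, h2b, cond_false]
      rw [ih (res ++ [l]) fi (fun x hx => hh x (by simp [hx])), List.take_succ_cons]
      simp

-- A's loop over no-header lines collects nothing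
theorem pvLoopA_noheader (fn : String) : ∀ (ls : List String) (fi : Int),
    (∀ x ∈ ls, pvIsHeader fn x = false) → pvLoopA fn ls [] false fi = [] := by
  intro ls
  induction ls with
  | nil => intro fi _; simp [pvLoopA]
  | cons l rest ih =>
    intro fi hh
    have h1 : pvIsHeader fn l = false := hh l (by simp)
    simp only [pvIsHeader, Bool.or_eq_false_iff] at h1
    obtain ⟨h1a, h1b⟩ := h1
    simp at h1a h1b
    simp only [pvLoopA]
    rw [if_neg (by simp [h1a, h1b])]
    simp only [Bool.false_eq_true, if_false]
    exact ih fi (fun x hx => hh x (by simp [hx]))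

-- A's loop on pre ++ header :: rest (no header in pre or rest)
theorem pvLoopA_found (fn : String) : ∀ (pre : List String) (l : String) (rest : List String) (fi : Int),
    (∀ x ∈ pre, pvIsHeader fn x = false) → pvIsHeader fn l = true →
    (∀ x ∈ rest, pvIsHeader fn x = false) →
    pvLoopA fn (pre ++ l :: rest) [] false fi
      = l :: rest.take (List.findIdx (pvIsBoundary (pvIndent l)) rest) := by
  intro pre
  induction pre with
  | nil =>
    intro l rest fi _ hl hr
    have hl' := hl
    simp [pvIsHeader] at hl'
    simp only [List.nil_append, pvLoopA]
    rw [if_pos (by simp [hl'])]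
    rw [pvLoopA_phase2 fn rest [l] (pvIndent l) hr]
    simp
  | cons p pre ih =>
    intro l rest fi hpre hl hr
    have hp : pvIsHeader fn p = false := hpre p (by simp)
    simp only [pvIsHeader, Bool.or_eq_false_iff] at hp
    obtain ⟨hpa, hpb⟩ := hp
    simp at hpa hpb
    simp only [List.cons_append, pvLoopA]
    rw [if_neg (by simp [hpa, hpb])]
    simp only [Bool.false_eq_true, if_false]
    exact ih l rest fi (fun x hx => hpre x (by simp [hx])) hl hr

theorem pvMain (fn : String) (lines : List String)
    (hpre : lines.countP (pvIsHeader fn) ≤ 1) :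
    (if pvLoopA fn lines [] false 0 ≠ [] then PySem.Str.join "\n" (pvLoopA fn lines [] false 0)
     else "def " ++ fn ++ "(p: dict) -> dict:\n    # 函数源码提取失败\n    pass")
    = (match pvIdxWhere (pvIsHeader fn) lines 0 with
      | [] => "def " ++ fn ++ "(p: dict) -> dict:\n    # 函数源码提取失败\n    pass"
      | start :: _ =>
        let level := pvIndent (PySem.List.pyGetD lines (start : Int) "")
        let terms := pvIdxWhere (pvIsBoundary level) lines 0
        let endIdx := (terms.find? (fun i => decide (start < i))).getD lines.length
        PySem.Str.join "\n" (PySem.List.slice lines (some (start : Int)) (some (endIdx : Int)))) := by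
  cases hfind : pvIdxWhere (pvIsHeader fn) lines 0 with
  | nil =>
    rw [pvLoopA_noheader fn lines 0 (pvIdxWhere_eq_nil lines 0 hfind)]
    simp
  | cons s t =>
    obtain ⟨pre, l, rest, heq, hpreH, hl, hs⟩ := pvIdxWhere_cons_decomp lines 0 s t hfind
    have hs' : s = pre.length := by omega
    subst hs'
    -- Pre_ forces rest to contain no header
    have hrest : ∀ x ∈ rest, pvIsHeader fn x = false := by
      have : lines.countP (pvIsHeader fn) = pre.countP (pvIsHeader fn) + 1 + rest.countP (pvIsHeader fn) := by
        simp [heq, List.countP_append, hl]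
        omega
      have hz : rest.countP (pvIsHeader fn) = 0 := by omega
      intro x hx
      have := List.countP_eq_zero.mp hz x hx
      simpa using this
    subst heq
    rw [pvLoopA_found fn pre l rest 0 hpreH hl hrest]
    dsimp only
    have hget : PySem.List.pyGetD (pre ++ l :: rest) ((pre.length : Nat) : Int) "" = l := by
      simp [PySem.List.pyGetD_natCast, List.getD]
    rw [hget]
    set level := pvIndent l with hlevel
    set q := pvIsBoundary level with hq
    -- the end index computed by B
    have hterms : pvIdxWhere q (pre ++ l :: rest) 0
        = pvIdxWhere q pre 0 ++ pvIdxWhere q (l :: rest) pre.length := by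
      rw [pvIdxWhere_append]; simp
    have hfindq : (List.find? (fun i => decide (pre.length < i)) (pvIdxWhere q (pre ++ l :: rest) 0)).getD
        (pre ++ l :: rest).length = pre.length + 1 + List.findIdx q rest := by
      rw [hterms, pvFind_skip]
      · have hsplit : pvIdxWhere q (l :: rest) pre.length
            = (if q l then [pre.length] else []) ++ pvIdxWhere q rest (pre.length + 1) := by
          by_cases hql : q l <;> simp [pvIdxWhere, hql]
        rw [hsplit, pvFind_skip, pvFind_head]
        · have := pvIdxWhere_head_getD (p := q) rest (pre.length + 1)
          simp only [List.length_append, List.length_cons]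
          rw [show pre.length + (rest.length + 1) = pre.length + 1 + rest.length by omega, this]
        · intro x hx
          have := pvIdxWhere_mem_bounds rest (pre.length + 1) x hx
          simp; omega
        · intro x hx
          by_cases hql : q l <;> simp [hql] at hx
          simp [hx]
      · intro x hx
        have := pvIdxWhere_mem_bounds pre 0 x hx
        simp; omega
    rw [hfindq]
    set k := List.findIdx q rest with hk
    have hkle : k ≤ rest.length := List.findIdx_le_length
    have hslice : PySem.List.slice (pre ++ l :: rest) (some ((pre.length : Nat) : Int))
        (some (((pre.length + 1 + k : Nat)) : Int)) = l :: rest.take k := by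
      rw [PySem.List.slice_of_nonneg (pre ++ l :: rest) (by positivity) (by positivity)
        (by simp; omega) (by simp; omega)]
      simp only [Int.toNat_natCast]
      rw [show (pre ++ l :: rest).drop pre.length = l :: rest from List.drop_left]
      rw [show pre.length + 1 + k - pre.length = k + 1 by omega]
      rw [List.take_succ_cons]
    rw [hslice]
    simp

-- ===== VERDICT (by name: the statement is the Claim_ definition above) =====
theorem extract_build_function_py_spec : Claim_equal_extract_build_function_py := by
  unfold Claim_equal_extract_build_function_py
  intro source_code fn_name _ hpre
  unfold Spec_extract_build_function_py extract_build_function_py extract_build_function_py_alt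
  dsimp only
  exact pvMain fn_name ((PySem.Str.split? source_code "\n").getD []) hpre
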